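-- pv_equiv track=rewrite | github.com/asier-ortiz/crohn-flare-predictor | api/ml_model.py | extract_medication_features
-- ===== SOURCE A (Python) =====
-- from typing import Dict, Tuple, List, Optional
--
-- def extract_medication_features(medications: List[str]) -> dict:
--     """
--     Extract medication features from medication list.
--
--     Args:
--         medications: List of medication names
--
--     Returns:
--         Dict with medication features
--     """
--     # Normalize to lowercase for matching
--     meds_lower = [med.lower() for med in medications]
--
--     # Define medication categories (from notebook 02b)
--     biologics = ['infliximab', 'remicade', 'humira', 'adalimumab', 'stelara',
--                 'ustekinumab', 'entyvio', 'vedolizumab', 'simponi', 'golimumab',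
--                 'cimzia', 'certolizumab']
--
--     immunosuppressants = ['azathioprine', 'imuran', '6-mp', 'mercaptopurine',
--                          'methotrexate', 'purinethol', 'cyclosporine']
--
--     corticosteroids = ['prednisone', 'prednisolone', 'budesonide', 'entocort',
--                       'hydrocortisone', 'methylprednisolone']
--
--     aminosalicylates = ['mesalamine', 'mesalazine', 'asacol', 'pentasa', 'lialda',
--                        'sulfasalazine', 'azulfidine', 'balsalazide', 'colazal']
--
--     # Count active medications in each category
--     biologics_active = sum(1 for med in meds_lower if any(b in med for b in biologics))
--     immunosuppressants_active = sum(1 for med in meds_lower if any(i in med for i in immunosuppressants))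
--     corticosteroids_active = sum(1 for med in meds_lower if any(c in med for c in corticosteroids))
--     aminosalicylates_active = sum(1 for med in meds_lower if any(a in med for a in aminosalicylates))
--
--     total_ibd_meds = biologics_active + immunosuppressants_active + corticosteroids_active + aminosalicylates_active
--
--     return {
--         'biologics_active': biologics_active,
--         'immunosuppressants_active': immunosuppressants_active,
--         'corticosteroids_active': corticosteroids_active,
--         'aminosalicylates_active': aminosalicylates_active,
--         'total_ibd_meds': total_ibd_meds
--     }
-- ===== SOURCE B (Python) =====
-- # Flat keyword->category table; build a stream of category tags (one per (med, matched category)),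
-- # then read the four counts off the tag stream and the total as its length.
-- _KEYWORD_TABLE = (
--     [(kw, 'biologics_active') for kw in
--      ['infliximab', 'remicade', 'humira', 'adalimumab', 'stelara',
--       'ustekinumab', 'entyvio', 'vedolizumab', 'simponi', 'golimumab',
--       'cimzia', 'certolizumab']]
--     + [(kw, 'immunosuppressants_active') for kw in
--        ['azathioprine', 'imuran', '6-mp', 'mercaptopurine',
--         'methotrexate', 'purinethol', 'cyclosporine']]
--     + [(kw, 'corticosteroids_active') for kw in
--        ['prednisone', 'prednisolone', 'budesonide', 'entocort',
--         'hydrocortisone', 'methylprednisolone']]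
--     + [(kw, 'aminosalicylates_active') for kw in
--        ['mesalamine', 'mesalazine', 'asacol', 'pentasa', 'lialda',
--         'sulfasalazine', 'azulfidine', 'balsalazide', 'colazal']]
-- )
--
-- def extract_medication_features(medications):
--     tags = []
--     for med in medications:
--         m = med.lower()
--         # each matched category contributes exactly one tag for this med
--         tags += list(dict.fromkeys(cat for kw, cat in _KEYWORD_TABLE if kw in m))
--     return {
--         'biologics_active': tags.count('biologics_active'),
--         'immunosuppressants_active': tags.count('immunosuppressants_active'),
--         'corticosteroids_active': tags.count('corticosteroids_active'),
--         'aminosalicylates_active': tags.count('aminosalicylates_active'),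
--         'total_ibd_meds': len(tags),
--     }
-- ===== Notes on version B (the rewrite author's own statement) =====
-- stated objective: alternative
-- what changed: Instead of four per-category sum-comprehension passes testing any(keyword in med), B flattens the categories into one keyword->category table, emits for each medication the deduplicated stream of matched category tags, and reads each feature as tags.count(category) with total_ibd_meds = len(tags).
import Mathlib
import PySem

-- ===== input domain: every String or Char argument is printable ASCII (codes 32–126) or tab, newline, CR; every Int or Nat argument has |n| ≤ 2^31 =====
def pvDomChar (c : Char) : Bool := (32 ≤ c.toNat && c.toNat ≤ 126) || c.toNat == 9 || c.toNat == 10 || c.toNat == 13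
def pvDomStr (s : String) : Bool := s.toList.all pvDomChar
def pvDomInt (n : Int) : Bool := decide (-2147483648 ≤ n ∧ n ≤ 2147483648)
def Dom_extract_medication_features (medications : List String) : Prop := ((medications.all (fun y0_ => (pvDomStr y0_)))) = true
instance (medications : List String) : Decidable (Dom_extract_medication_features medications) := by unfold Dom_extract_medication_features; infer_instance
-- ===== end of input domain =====

-- B replaces A's four per-category counting passes by one flat keyword→category table producing a
-- deduplicated tag stream per medication; features are tag counts and total_ibd_meds = len(tags).

-- ===== PORT A =====
def kwBiologics : List String := ["infliximab", "remicade", "humira", "adalimumab", "stelara",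
  "ustekinumab", "entyvio", "vedolizumab", "simponi", "golimumab", "cimzia", "certolizumab"]
def kwImmuno : List String := ["azathioprine", "imuran", "6-mp", "mercaptopurine",
  "methotrexate", "purinethol", "cyclosporine"]
def kwCortico : List String := ["prednisone", "prednisolone", "budesonide", "entocort",
  "hydrocortisone", "methylprednisolone"]
def kwAmino : List String := ["mesalamine", "mesalazine", "asacol", "pentasa", "lialda",
  "sulfasalazine", "azulfidine", "balsalazide", "colazal"]

-- any(kw in med for kw in kws)
def kwHit (kws : List String) (med : String) : Bool := kws.any (fun k => PySem.Str.isIn k med)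

-- sum(1 for med in meds_lower if any(kw in med for kw in kws))
def sumHits (kws : List String) (medsLower : List String) : Int :=
  medsLower.foldl (fun acc med => if kwHit kws med then acc + 1 else acc) 0

def extract_medication_features (medications : List String) : List (String × Int) :=
  let meds_lower := medications.map PySem.Str.lower
  let biologics_active := sumHits kwBiologics meds_lower
  let immunosuppressants_active := sumHits kwImmuno meds_lower
  let corticosteroids_active := sumHits kwCortico meds_lower
  let aminosalicylates_active := sumHits kwAmino meds_lower
  let total := biologics_active + immunosuppressants_active + corticosteroids_active + aminosalicylates_active
  [("biologics_active", biologics_active),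
   ("immunosuppressants_active", immunosuppressants_active),
   ("corticosteroids_active", corticosteroids_active),
   ("aminosalicylates_active", aminosalicylates_active),
   ("total_ibd_meds", total)]

-- ===== PORT B =====
-- _KEYWORD_TABLE: flat keyword → category list
def kwTable : List (String × String) :=
  kwBiologics.map (fun k => (k, "biologics_active"))
  ++ kwImmuno.map (fun k => (k, "immunosuppressants_active"))
  ++ kwCortico.map (fun k => (k, "corticosteroids_active"))
  ++ kwAmino.map (fun k => (k, "aminosalicylates_active"))

-- list(dict.fromkeys(cat for kw, cat in _KEYWORD_TABLE if kw in m))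
def medTags (m : String) : List String :=
  PySem.List.dedup ((kwTable.filter (fun p => PySem.Str.isIn p.1 m)).map Prod.snd)

def extract_medication_features_alt (medications : List String) : List (String × Int) :=
  let tags := medications.foldl (fun acc med => acc ++ medTags (PySem.Str.lower med)) []
  [("biologics_active", (tags.count "biologics_active" : Int)),
   ("immunosuppressants_active", (tags.count "immunosuppressants_active" : Int)),
   ("corticosteroids_active", (tags.count "corticosteroids_active" : Int)),
   ("aminosalicylates_active", (tags.count "aminosalicylates_active" : Int)),
   ("total_ibd_meds", (tags.length : Int))]

-- ===== PRECONDITION & SPEC =====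
def Spec_extract_medication_features (medications : List String) (out : List (String × Int)) : Prop := out = extract_medication_features_alt medications
instance (medications : List String) (out : List (String × Int)) : Decidable (Spec_extract_medication_features medications out) := by unfold Spec_extract_medication_features; infer_instance

-- ===== CLAIM (what is proved, stated in full; the proofs are below) =====
def Claim_equal_extract_medication_features : Prop := ∀ (medications : List String), Dom_extract_medication_features medications → Spec_extract_medication_features medications (extract_medication_features medications)

-- ===== LEMMAS AND PROOFS =====

-- the tag stream of B is a flatMap of per-med tag lists
theorem tags_eq_flatMap (meds : List String) :
    meds.foldl (fun acc med => acc ++ medTags (PySem.Str.lower med)) []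
      = meds.flatMap (fun med => medTags (PySem.Str.lower med)) := by
  simpa using PySem.List.foldl_append_eq_flatMap (fun med => medTags (PySem.Str.lower med)) meds []

-- membership of a category in a med's tag list ↔ A's any() test
theorem mem_medTags_bio (m : String) : "biologics_active" ∈ medTags m ↔ kwHit kwBiologics m := by
  simp [medTags, kwTable, kwBiologics, kwImmuno, kwCortico, kwAmino, kwHit, List.mem_filter]
theorem mem_medTags_imm (m : String) : "immunosuppressants_active" ∈ medTags m ↔ kwHit kwImmuno m := by
  simp [medTags, kwTable, kwBiologics, kwImmuno, kwCortico, kwAmino, kwHit, List.mem_filter]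
theorem mem_medTags_cor (m : String) : "corticosteroids_active" ∈ medTags m ↔ kwHit kwCortico m := by
  simp [medTags, kwTable, kwBiologics, kwImmuno, kwCortico, kwAmino, kwHit, List.mem_filter]
theorem mem_medTags_ami (m : String) : "aminosalicylates_active" ∈ medTags m ↔ kwHit kwAmino m := by
  simp [medTags, kwTable, kwBiologics, kwImmuno, kwCortico, kwAmino, kwHit, List.mem_filter]

-- every tag is one of the four category names
theorem medTags_cases (m : String) (x : String) (hx : x ∈ medTags m) :
    x = "biologics_active" ∨ x = "immunosuppressants_active" ∨
    x = "corticosteroids_active" ∨ x = "aminosalicylates_active" := by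
  simp only [medTags, PySem.List.mem_dedup, List.mem_map, List.mem_filter] at hx
  obtain ⟨p, ⟨hp, _⟩, rfl⟩ := hx
  have hall : ∀ q ∈ kwTable, q.2 = "biologics_active" ∨ q.2 = "immunosuppressants_active" ∨
      q.2 = "corticosteroids_active" ∨ q.2 = "aminosalicylates_active" := by decide
  exact hall p hp

-- a nodup list counts its members 0/1
theorem count_medTags (m : String) (c : String) :
    ((medTags m).count c : Int) = if c ∈ medTags m then 1 else 0 := by
  split
  · exact_mod_cast congrArg Nat.cast
      (List.count_eq_one_of_mem (by simp [medTags]) ‹_›)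
  · exact_mod_cast congrArg Nat.cast (List.count_eq_zero_of_not_mem ‹_›)

-- length of a per-med tag list = sum of the four indicator counts
theorem length_medTags (m : String) :
    ((medTags m).length : Int)
      = ((medTags m).count "biologics_active" : Int)
        + ((medTags m).count "immunosuppressants_active" : Int)
        + ((medTags m).count "corticosteroids_active" : Int)
        + ((medTags m).count "aminosalicylates_active" : Int) := by
  have hnd : (medTags m).Nodup := by simp [medTags]
  have := medTags_cases m
  generalize h : medTags m = l at *
  clear h
  induction l with
  | nil => simp
  | cons x t ih =>
    have ht := ih hnd.of_cons (fun y hy => this y (List.mem_cons_of_mem _ hy))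
    rcases this x (List.mem_cons_self) with rfl | rfl | rfl | rfl <;>
      simp <;> omega

-- A's loop, cons step
theorem sumHits_shift (kws : List String) (meds : List String) (x : Int) :
    meds.foldl (fun acc med => if kwHit kws med then acc + 1 else acc) x
      = x + sumHits kws meds := by
  induction meds generalizing x with
  | nil => simp [sumHits]
  | cons m t ih =>
    simp only [sumHits, List.foldl_cons]
    rw [ih, ih]
    split <;> omega

theorem sumHits_cons (kws : List String) (m : String) (t : List String) :
    sumHits kws (m :: t) = (if kwHit kws m then (1 : Int) else 0) + sumHits kws t := by
  by_cases h : kwHit kws m <;>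
    simp only [sumHits, List.foldl_cons, h, if_true] <;>
    rw [sumHits_shift] <;> simp [sumHits]

-- counts over the flatMap tag stream = A's per-category sums
theorem count_flatMap_eq (meds : List String) (c : String) (kws : List String)
    (h : ∀ m, ((medTags m).count c : Int) = if kwHit kws m then 1 else 0) :
    ((meds.flatMap (fun med => medTags (PySem.Str.lower med))).count c : Int)
      = sumHits kws (meds.map PySem.Str.lower) := by
  induction meds with
  | nil => simp [sumHits]
  | cons m t ih =>
    simp only [List.flatMap_cons, List.count_append, List.map_cons, sumHits_cons]
    push_cast
    rw [ih, h (PySem.Str.lower m)]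

theorem length_flatMap_eq (meds : List String) :
    ((meds.flatMap (fun med => medTags (PySem.Str.lower med))).length : Int)
      = sumHits kwBiologics (meds.map PySem.Str.lower)
        + sumHits kwImmuno (meds.map PySem.Str.lower)
        + sumHits kwCortico (meds.map PySem.Str.lower)
        + sumHits kwAmino (meds.map PySem.Str.lower) := by
  induction meds with
  | nil => simp [sumHits]
  | cons m t ih =>
    simp only [List.flatMap_cons, List.length_append, List.map_cons, sumHits_cons]
    push_cast
    rw [ih, length_medTags (PySem.Str.lower m)]
    simp only [count_medTags, mem_medTags_bio, mem_medTags_imm, mem_medTags_cor, mem_medTags_ami]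
    split_ifs <;> omega

theorem count_eq_ind (c : String) (kws : List String)
    (hmem : ∀ m, c ∈ medTags m ↔ kwHit kws m) (m : String) :
    ((medTags m).count c : Int) = if kwHit kws m then 1 else 0 := by
  rw [count_medTags]
  simp [hmem m]

-- ===== VERDICT (by name: the statement is the Claim_ definition above) =====
theorem extract_medication_features_spec : Claim_equal_extract_medication_features := by
  intro meds _
  show extract_medication_features meds = extract_medication_features_alt meds
  simp only [extract_medication_features, extract_medication_features_alt, tags_eq_flatMap,
    count_flatMap_eq _ _ _ (count_eq_ind _ _ mem_medTags_bio),
    count_flatMap_eq _ _ _ (count_eq_ind _ _ mem_medTags_imm),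
    count_flatMap_eq _ _ _ (count_eq_ind _ _ mem_medTags_cor),
    count_flatMap_eq _ _ _ (count_eq_ind _ _ mem_medTags_ami),
    length_flatMap_eq]
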